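-- pv_equiv track=rewrite | github.com/HeeminYang/GFL | code/formula/formula_performance.py | get_agg_start
-- ===== SOURCE A (Python) =====
-- def get_agg_start(start_point, log):
--     for i in range(start_point, len(log)):
--         if "Aggregation test" in log[i]:
--             agg_start_point = i
--             break
--     for i in range(agg_start_point, len(log)):
--         if "external test" in log[i]:
--             agg_end_point = i
--             break
--     return agg_start_point, agg_end_point
-- ===== SOURCE B (Python) =====
-- def get_agg_start(start_point, log):
--     # One pass with a flag instead of A's two separate scans; the line that
--     # sets the flag is itself also checked for the end marker, matching A's
--     # second loop restarting at agg_start_point. As in A, variables are not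
--     # pre-initialised, so a missing marker raises NameError at the return.
--     found_start = False
--     for i in range(start_point, len(log)):
--         line = log[i]
--         if not found_start and "Aggregation test" in line:
--             agg_start_point = i
--             found_start = True
--         if found_start and "external test" in line:
--             agg_end_point = i
--             break
--     return agg_start_point, agg_end_point
-- ===== Notes on version B (the rewrite author's own statement) =====
-- stated objective: alternative
-- what changed: Replaces A's two consecutive scans (find 'Aggregation test', then rescan from there for 'external test') by a single loop over the same index range carrying a found_start flag, checking the end marker only once the flag is set.
import Mathlib
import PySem

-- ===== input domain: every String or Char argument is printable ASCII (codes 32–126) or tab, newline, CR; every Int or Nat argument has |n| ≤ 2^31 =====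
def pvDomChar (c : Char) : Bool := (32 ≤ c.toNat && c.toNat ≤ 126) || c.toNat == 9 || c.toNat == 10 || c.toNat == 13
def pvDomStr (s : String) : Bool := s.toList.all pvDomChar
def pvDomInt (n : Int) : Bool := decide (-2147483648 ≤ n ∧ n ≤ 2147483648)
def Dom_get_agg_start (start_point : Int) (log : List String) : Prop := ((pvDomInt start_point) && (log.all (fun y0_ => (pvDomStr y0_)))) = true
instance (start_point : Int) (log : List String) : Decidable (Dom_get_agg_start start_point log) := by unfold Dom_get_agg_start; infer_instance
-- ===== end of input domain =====

-- B replaces A's two consecutive scans by ONE loop with a found_start flag (objective: alternative, not faster).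
-- Where the Python raises (marker missing, or start_point < -len(log): NameError/IndexError) the ports return a
-- dummy value; Pre_ excludes exactly those inputs.

-- ===== PORT A =====
-- A's 'for i in range(a, len(log)): if needle in log[i]: … break' scan; none = the loop fell through
-- (unbound variable) or log[i] raised IndexError.
def pvFind (needle : String) (log : List String) : List Int → Option Int
  | [] => none
  | i :: rest =>
    match PySem.List.pyGet? log i with
    | none => none
    | some line => if PySem.Str.isIn needle line then some i else pvFind needle log rest

def get_agg_start (start_point : Int) (log : List String) : Int × Int :=
  match pvFind "Aggregation test" log (PySem.List.pyRange start_point (log.length : Int) 1) with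
  | none => (0, 0)   -- Python: NameError (agg_start_point unbound) or IndexError
  | some i0 =>
    match pvFind "external test" log (PySem.List.pyRange i0 (log.length : Int) 1) with
    | none => (i0, 0)   -- Python: NameError (agg_end_point unbound)
    | some j => (i0, j)

-- ===== PORT B =====
-- B's single loop; the accumulator is agg_start_point once found_start is set (Option Int = the flag+variable).
def pvScan (log : List String) : Option Int → List Int → Option (Int × Int)
  | _, [] => none
  | agg, i :: rest =>
    match PySem.List.pyGet? log i with
    | none => none
    | some line =>
      let agg' : Option Int :=
        match agg with
        | none => if PySem.Str.isIn "Aggregation test" line then some i else none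
        | some a => some a
      match agg' with
      | none => pvScan log none rest
      | some a => if PySem.Str.isIn "external test" line then some (a, i) else pvScan log (some a) rest

def get_agg_start_alt (start_point : Int) (log : List String) : Int × Int :=
  match pvScan log none (PySem.List.pyRange start_point (log.length : Int) 1) with
  | none => (0, 0)   -- Python: NameError
  | some r => r

-- ===== PRECONDITION & SPEC =====
def pvHasAt (log : List String) (i : Int) (needle : String) : Bool :=
  match PySem.List.pyGet? log i with
  | some line => PySem.Str.isIn needle line
  | none => false

-- Pre_ excludes exactly the inputs where A raises: start_point < -len(log) (IndexError on the first
-- access) or one of the two markers is never found at/after its scan start (NameError on the return).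
def Pre_get_agg_start (start_point : Int) (log : List String) : Prop :=
  -(log.length : Int) ≤ start_point ∧
  ∃ i ∈ PySem.List.pyRange start_point (log.length : Int) 1,
    pvHasAt log i "Aggregation test" = true ∧
    ∃ j ∈ PySem.List.pyRange i (log.length : Int) 1, pvHasAt log j "external test" = true

instance (start_point : Int) (log : List String) : Decidable (Pre_get_agg_start start_point log) := by
  unfold Pre_get_agg_start; infer_instance

def pvWitness_get_agg_start : Int × List String := (0, ["x", "Aggregation test run", "some external test line"])

def Spec_get_agg_start (start_point : Int) (log : List String) (out : Int × Int) : Prop := out = get_agg_start_alt start_point log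
instance (start_point : Int) (log : List String) (out : Int × Int) : Decidable (Spec_get_agg_start start_point log out) := by unfold Spec_get_agg_start; infer_instance

-- ===== CLAIM (what is proved, stated in full; the proofs are below) =====
def Claim_equal_get_agg_start : Prop := ∀ (start_point : Int) (log : List String), Dom_get_agg_start start_point log → Pre_get_agg_start start_point log → Spec_get_agg_start start_point log (get_agg_start start_point log)

-- ===== LEMMAS AND PROOFS =====

-- pvScan after found_start is set is exactly A's second scan.
lemma pvScan_some (log : List String) (a : Int) :
    ∀ is : List Int, pvScan log (some a) is = (pvFind "external test" log is).map (fun j => (a, j)) := by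
  intro is
  induction is with
  | nil => simp [pvScan, pvFind]
  | cons i rest ih =>
    simp only [pvScan, pvFind]
    cases PySem.List.pyGet? log i with
    | none => rfl
    | some line =>
      dsimp only
      split
      · simp
      · simpa using ih

-- The single pass with a flag equals the composition of the two scans.
lemma pvScan_eq (log : List String) :
    ∀ (k : Nat) (sp : Int), ((log.length : Int) - sp).toNat = k →
      pvScan log none (PySem.List.pyRange sp (log.length : Int) 1) =
        (pvFind "Aggregation test" log (PySem.List.pyRange sp (log.length : Int) 1)).bind
          (fun i0 => (pvFind "external test" log (PySem.List.pyRange i0 (log.length : Int) 1)).map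
            (fun j => (i0, j))) := by
  intro k
  induction k with
  | zero =>
    intro sp hk
    rw [PySem.List.pyRange_one_eq_nil (by omega)]
    simp [pvScan, pvFind]
  | succ m ih =>
    intro sp hk
    have hsp : sp < (log.length : Int) := by omega
    rw [PySem.List.pyRange_one_cons hsp]
    simp only [pvScan, pvFind]
    cases hline : PySem.List.pyGet? log sp with
    | none => rfl
    | some line =>
      dsimp only
      by_cases hagg : PySem.Str.isIn "Aggregation test" line
      · simp only [if_pos hagg, Option.bind]
        rw [PySem.List.pyRange_one_cons hsp]
        simp only [pvFind, hline]
        by_cases hext : PySem.Str.isIn "external test" line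
        · simp only [if_pos hext]
          rfl
        · simp only [if_neg hext]
          exact pvScan_some log sp _
      · simp only [if_neg hagg]
        exact ih (sp + 1) (by omega)

lemma pvFind_mem {needle : String} {log : List String} :
    ∀ {is : List Int} {i0 : Int}, pvFind needle log is = some i0 →
      i0 ∈ is ∧ pvHasAt log i0 needle = true := by
  intro is
  induction is with
  | nil => intro i0 h; simp [pvFind] at h
  | cons i rest ih =>
    intro i0 h
    simp only [pvFind] at h
    cases hline : PySem.List.pyGet? log i with
    | none => rw [hline] at h; exact absurd h (by simp)
    | some line =>
      rw [hline] at h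
      dsimp only at h
      by_cases hn : PySem.Str.isIn needle line
      · rw [if_pos hn] at h
        cases h
        exact ⟨List.mem_cons_self, by unfold pvHasAt; rw [hline]; exact hn⟩
      · rw [if_neg hn] at h
        obtain ⟨h1, h2⟩ := ih h
        exact ⟨List.mem_cons_of_mem _ h1, h2⟩

-- pvFind on a step-1 range returns the FIRST match: any match is at or after it.
lemma pvFind_range_le {needle : String} {log : List String} {n : Int} :
    ∀ (k : Nat) (sp : Int), (n - sp).toNat = k →
      ∀ {i0 i : Int}, pvFind needle log (PySem.List.pyRange sp n 1) = some i0 →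
        i ∈ PySem.List.pyRange sp n 1 → pvHasAt log i needle = true → i0 ≤ i := by
  intro k
  induction k with
  | zero =>
    intro sp hk i0 i h hi _
    rw [PySem.List.pyRange_one_eq_nil (by omega)] at h
    simp [pvFind] at h
  | succ m ih =>
    intro sp hk i0 i h hi hmatch
    have hsp : sp < n := by omega
    have hrange := PySem.List.mem_pyRange_one.mp hi
    rw [PySem.List.pyRange_one_cons hsp] at h
    simp only [pvFind] at h
    cases hline : PySem.List.pyGet? log sp with
    | none => rw [hline] at h; exact absurd h (by simp)
    | some line =>
      rw [hline] at h
      dsimp only at h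
      by_cases hn : PySem.Str.isIn needle line
      · rw [if_pos hn] at h
        cases h
        omega
      · rw [if_neg hn] at h
        have hisp : i ≠ sp := by
          intro he
          rw [he] at hmatch
          unfold pvHasAt at hmatch
          rw [hline] at hmatch
          exact hn hmatch
        exact ih (sp + 1) (by omega) h (PySem.List.mem_pyRange_one.mpr (by omega)) hmatch

-- If some element of the range matches and the range start is ≥ -len, pvFind succeeds.
lemma pvFind_succeeds {needle : String} {log : List String} :
    ∀ (k : Nat) (sp : Int), ((log.length : Int) - sp).toNat = k →
      -(log.length : Int) ≤ sp →
      (∃ i ∈ PySem.List.pyRange sp (log.length : Int) 1, pvHasAt log i needle = true) →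
      ∃ i0, pvFind needle log (PySem.List.pyRange sp (log.length : Int) 1) = some i0 := by
  intro k
  induction k with
  | zero =>
    intro sp hk _ hex
    obtain ⟨i, hi, _⟩ := hex
    rw [PySem.List.pyRange_one_eq_nil (by omega)] at hi
    simp at hi
  | succ m ih =>
    intro sp hk hlo hex
    have hsp : sp < (log.length : Int) := by omega
    rw [PySem.List.pyRange_one_cons hsp]
    simp only [pvFind]
    cases hline : PySem.List.pyGet? log sp with
    | none =>
      exfalso
      rw [PySem.List.pyGet?_eq_none_iff] at hline
      exact hline ⟨hlo, hsp⟩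
    | some line =>
      dsimp only
      by_cases hn : PySem.Str.isIn needle line
      · exact ⟨sp, by rw [if_pos hn]⟩
      · rw [if_neg hn]
        apply ih (sp + 1) (by omega) (by omega)
        obtain ⟨i, hi, hm⟩ := hex
        have hrange := PySem.List.mem_pyRange_one.mp hi
        refine ⟨i, PySem.List.mem_pyRange_one.mpr ⟨?_, hrange.2⟩, hm⟩
        rcases Int.lt_or_le sp i with h | h
        · omega
        · exfalso
          have : i = sp := by omega
          rw [this] at hm
          unfold pvHasAt at hm
          rw [hline] at hm
          exact hn hm
  
-- ===== VERDICT (by name: the statement is the Claim_ definition above) =====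
theorem get_agg_start_spec : Claim_equal_get_agg_start := by
  intro sp log _ hpre
  obtain ⟨hlo, i, hi, haggi, j, hj, hextj⟩ := hpre
  unfold Spec_get_agg_start get_agg_start get_agg_start_alt
  rw [pvScan_eq log (((log.length : Int) - sp).toNat) sp rfl]
  obtain ⟨i0, hfind⟩ := pvFind_succeeds (((log.length : Int) - sp).toNat) sp rfl hlo ⟨i, hi, haggi⟩
  rw [hfind]
  simp only [Option.bind]
  obtain ⟨hi0mem, _⟩ := pvFind_mem hfind
  have hi0range := PySem.List.mem_pyRange_one.mp hi0mem
  have hi0le : i0 ≤ i := pvFind_range_le (((log.length : Int) - sp).toNat) sp rfl hfind hi haggi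
  have hjrange := PySem.List.mem_pyRange_one.mp hj
  obtain ⟨j0, hfind2⟩ := pvFind_succeeds (((log.length : Int) - i0).toNat) i0 rfl (by omega)
    ⟨j, PySem.List.mem_pyRange_one.mpr ⟨by omega, hjrange.2⟩, hextj⟩
  rw [hfind2]
  simp
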